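-- pv_equiv track=rewrite | github.com/amitd8/RaPidAnalytics | kfge2.py | DetectLOLBAS
-- ===== SOURCE A (Python) =====
-- def printhierarchyhelper(pid,apps):
--     if pid in apps:
--         return str(printhierarchy(apps[pid][0],apps)) + " --> " + apps[pid][1]+"("+pid+")"
--
-- def printhierarchy(pid,apps):
--         return str(printhierarchyhelper(pid,apps)).replace("None --> ","")
--
-- def count_occurrences(apps, pname):
--     count = 0
--     pids = []
--     for pid, name in apps.items():
--         if name[1] == pname:
--             count += 1
--             pids.append(pid)
--     return count, pids
--
-- def DetectLOLBAS(apps):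
--     analysis = ""
--     proc = ["powershell.exe","cmd.exe","wscript.exe","cscript.exe","mshta.exe","wmic.exe"]
--     for process in proc:
--         c,pids = count_occurrences(apps,process)
--         for dis in pids:
--             h = (printhierarchy(dis,apps))
--             analysis += "   "+h+"\n"+"   (Medium) "+process+" is often used by attackers. "+dis+ "\n"+"\n"
--     if analysis.strip():
--         lines = analysis.split('\n')
--         lines.insert(0, "Suspicious LOLBAS detections (T1059):")
--         return '\n'.join(lines)
--     else:
--         return analysis
-- ===== SOURCE B (Python) =====
-- def printhierarchyhelper(pid,apps):
--     if pid in apps: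
--         return str(printhierarchy(apps[pid][0],apps)) + " --> " + apps[pid][1]+"("+pid+")"
--
-- def printhierarchy(pid,apps):
--         return str(printhierarchyhelper(pid,apps)).replace("None --> ","")
--
-- def DetectLOLBAS(apps):
--     index = {}
--     for pid, name in apps.items():
--         index.setdefault(name[1], []).append(pid)
--     analysis = ""
--     for process in ["powershell.exe","cmd.exe","wscript.exe","cscript.exe","mshta.exe","wmic.exe"]:
--         for dis in index.get(process, []):
--             analysis += "   "+printhierarchy(dis,apps)+"\n"+"   (Medium) "+process+" is often used by attackers. "+dis+"\n"+"\n"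
--     if analysis.strip():
--         return "Suspicious LOLBAS detections (T1059):\n" + analysis
--     return analysis
-- ===== Notes on version B (the rewrite author's own statement) =====
-- stated objective: alternative
-- what changed: B replaces A's six full scans of the dict (one count_occurrences pass per LOLBAS name) with a single pass that builds a name->pids index dict, then looks each of the six names up directly; the header is prepended with one string concatenation instead of A's split/insert/join round-trip.
import Mathlib
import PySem

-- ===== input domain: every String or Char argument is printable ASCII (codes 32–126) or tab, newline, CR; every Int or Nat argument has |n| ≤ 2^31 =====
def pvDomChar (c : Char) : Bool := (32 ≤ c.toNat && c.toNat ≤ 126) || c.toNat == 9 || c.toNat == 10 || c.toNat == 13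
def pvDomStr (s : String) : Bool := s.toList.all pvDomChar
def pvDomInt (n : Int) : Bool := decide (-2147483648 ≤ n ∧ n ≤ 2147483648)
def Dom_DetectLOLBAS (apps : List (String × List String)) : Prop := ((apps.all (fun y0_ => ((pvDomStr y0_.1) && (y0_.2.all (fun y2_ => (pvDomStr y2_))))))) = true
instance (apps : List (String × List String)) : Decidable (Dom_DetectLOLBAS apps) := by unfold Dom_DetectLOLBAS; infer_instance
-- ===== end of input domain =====

-- B builds a name→pids index in ONE pass over the dict and then walks the fixed LOLBAS list,
-- replacing A's six full scans (count_occurrences per process) and its split/insert/join header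
-- round-trip with a direct lookup per process and a plain string prepend (objective:
-- alternative structure; same return value).

-- ===== PORT A =====
-- str(x) for x : Option String (None -> "None")
def pvStrOpt : Option String → String
  | none => "None"
  | some s => s

-- printhierarchyhelper / printhierarchy (mutual recursion in Python, fused here: the recursive
-- call `printhierarchy(apps[pid][0], apps)` is inlined as its body str(...).replace(...)).
-- `fuel` only makes the recursion structural; under Pre_ every parent chain leaves the dict
-- within `size` steps, so fuel `size+1` is never exhausted (and when the chain exits, the
-- value `none` agrees with the fuel-0 value).
def pvPhh (apps : PySem.Dict String (List String)) : Nat → String → Option String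
  | 0, _ => none
  | fuel+1, pid =>
    match apps.get? pid with
    | some name =>
        some ((PySem.Str.replace (pvStrOpt (pvPhh apps fuel (PySem.List.pyGetD name 0 ""))) "None --> " "")
              ++ " --> " ++ PySem.List.pyGetD name 1 "" ++ "(" ++ pid ++ ")")
    | none => none

def pvPh (apps : PySem.Dict String (List String)) (fuel : Nat) (pid : String) : String :=
  PySem.Str.replace (pvStrOpt (pvPhh apps fuel pid)) "None --> " ""

def pvCountOccurrences (apps : PySem.Dict String (List String)) (pname : String) : Int × List String :=
  apps.items.foldl
    (fun (acc : Int × List String) p =>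
      if PySem.List.pyGetD p.2 1 "" == pname then (acc.1 + 1, acc.2 ++ [p.1]) else acc)
    (0, [])

def pvProc : List String :=
  ["powershell.exe", "cmd.exe", "wscript.exe", "cscript.exe", "mshta.exe", "wmic.exe"]

-- the body of the inner `for dis in pids:` loop (identical text in A and B)
def pvBlock (apps : PySem.Dict String (List String)) (process dis : String) : String :=
  "   " ++ pvPh apps (apps.size + 1) dis ++ "\n" ++ "   (Medium) " ++ process
  ++ " is often used by attackers. " ++ dis ++ "\n" ++ "\n"

def DetectLOLBAS (apps0 : List (String × List String)) : String :=
  let apps := PySem.Dict.ofList apps0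
  let analysis :=
    pvProc.foldl
      (fun analysis process =>
        (pvCountOccurrences apps process).2.foldl
          (fun analysis dis => analysis ++ pvBlock apps process dis) analysis)
      ""
  if PySem.Str.strip analysis ≠ "" then
    PySem.Str.join "\n"
      ("Suspicious LOLBAS detections (T1059):" :: ((PySem.Str.split? analysis "\n").getD []))
  else analysis

-- ===== PORT B =====
def DetectLOLBAS_alt (apps0 : List (String × List String)) : String :=
  let apps := PySem.Dict.ofList apps0
  -- index.setdefault(name[1], []).append(pid)  ==  index[name[1]] = index.get(name[1], []) + [pid]
  let index := apps.items.foldl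
      (fun (ix : PySem.Dict String (List String)) p =>
        ix.modify (PySem.List.pyGetD p.2 1 "") [] (· ++ [p.1]))
      PySem.Dict.empty
  let analysis :=
    pvProc.foldl
      (fun analysis process =>
        (index.getD process []).foldl
          (fun analysis dis => analysis ++ pvBlock apps process dis) analysis)
      ""
  if PySem.Str.strip analysis ≠ "" then
    "Suspicious LOLBAS detections (T1059):\n" ++ analysis
  else analysis

-- ===== PRECONDITION & SPEC =====
def pvParent (apps : PySem.Dict String (List String)) (pid : String) : String :=
  PySem.List.pyGetD ((apps.get? pid).getD []) 0 ""

-- the parent chain starting at `pid` leaves the dict within `n` steps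
def pvEscapes (apps : PySem.Dict String (List String)) : Nat → String → Bool
  | 0, pid => !(apps.contains pid)
  | n+1, pid => !(apps.contains pid) || pvEscapes apps n (pvParent apps pid)

-- Pre_ excludes exactly the inputs where the Python raises: a value list with fewer than 2
-- entries (IndexError in count_occurrences / printhierarchyhelper), or a suspicious pid whose
-- parent chain cycles inside the dict (unbounded recursion in printhierarchy).
def Pre_DetectLOLBAS (apps : List (String × List String)) : Prop :=
  (∀ v ∈ (PySem.Dict.ofList apps).values, 2 ≤ v.length) ∧
  (∀ p ∈ (PySem.Dict.ofList apps).items,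
      PySem.List.pyGetD p.2 1 "" ∈ pvProc →
      pvEscapes (PySem.Dict.ofList apps) (PySem.Dict.ofList apps).size p.1 = true)
instance (apps : List (String × List String)) : Decidable (Pre_DetectLOLBAS apps) := by
  unfold Pre_DetectLOLBAS; infer_instance

def pvWitness_DetectLOLBAS : (List (String × List String)) :=
  [("17", ["1", "cmd.exe"]), ("1", ["0", "init"])]

def Spec_DetectLOLBAS (apps : List (String × List String)) (out : String) : Prop := out = DetectLOLBAS_alt apps
instance (apps : List (String × List String)) (out : String) : Decidable (Spec_DetectLOLBAS apps out) := by unfold Spec_DetectLOLBAS; infer_instance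

-- ===== CLAIM (what is proved, stated in full; the proofs are below) =====
def Claim_equal_DetectLOLBAS : Prop := ∀ (apps : List (String × List String)), Dom_DetectLOLBAS apps → Pre_DetectLOLBAS apps → Spec_DetectLOLBAS apps (DetectLOLBAS apps)

-- ===== LEMMAS AND PROOFS =====

theorem pvIntercalate_cons (sep a : List Char) (t : List (List Char)) (h : t ≠ []) :
    sep.intercalate (a :: t) = a ++ sep ++ sep.intercalate t := by
  cases t with
  | nil => simp_all
  | cons b t => simp [List.intercalate, List.intersperse]

theorem pvGo_ne_nil (sep : List Char) (fuel : Nat) (l cur : List Char) (acc : List (List Char)) :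
    PySem.Chars.splitOn.go sep fuel l cur acc ≠ [] := by
  induction fuel generalizing l cur acc with
  | zero => simp [PySem.Chars.splitOn.go]
  | succ n ih =>
    cases l with
    | nil => simp [PySem.Chars.splitOn.go]
    | cons c rest =>
      rw [PySem.Chars.splitOn.go]
      split <;> apply ih

theorem pvGo_acc (sep : List Char) (fuel : Nat) (l cur : List Char) (acc : List (List Char)) :
    PySem.Chars.splitOn.go sep fuel l cur acc
      = acc.reverse ++ PySem.Chars.splitOn.go sep fuel l cur [] := by
  induction fuel generalizing l cur acc with
  | zero => simp [PySem.Chars.splitOn.go]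
  | succ n ih =>
    cases l with
    | nil => simp [PySem.Chars.splitOn.go]
    | cons c rest =>
      rw [PySem.Chars.splitOn.go, PySem.Chars.splitOn.go]
      split
      · rw [ih _ _ (cur.reverse :: acc), ih _ _ [cur.reverse]]
        simp
      · exact ih _ _ _

theorem pvGo_join (sep : List Char) (hsep : sep ≠ []) (fuel : Nat) (l cur : List Char)
    (hfuel : l.length ≤ fuel) :
    sep.intercalate (PySem.Chars.splitOn.go sep fuel l cur []) = cur.reverse ++ l := by
  induction fuel generalizing l cur with
  | zero =>
    have : l = [] := by cases l <;> simp_all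
    subst this
    simp [PySem.Chars.splitOn.go, List.intercalate]
  | succ n ih =>
    cases l with
    | nil => simp [PySem.Chars.splitOn.go, List.intercalate]
    | cons c rest =>
      rw [PySem.Chars.splitOn.go]
      split
      · rename_i hpre
        rw [pvGo_acc]
        have hlen : (List.drop sep.length (c :: rest)).length ≤ n := by
          have : 1 ≤ sep.length := by cases sep <;> simp_all
          have h2 : rest.length ≤ n := by simpa using hfuel
          simp
          omega
        simp only [List.reverse_singleton, List.singleton_append]
        rw [pvIntercalate_cons _ _ _ (pvGo_ne_nil sep n _ [] []),
            ih (List.drop sep.length (c :: rest)) [] hlen]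
        have := List.prefix_iff_eq_append.mp (List.isPrefixOf_iff_prefix.mp hpre)
        simp
        conv_rhs => rw [← this]
      · rename_i hpre
        have := ih rest (c :: cur) (by simpa using Nat.le_of_succ_le_succ (by simpa using hfuel))
        rw [this]
        simp

theorem pvJoin_splitOn (sep cs : List Char) (hsep : sep ≠ []) :
    sep.intercalate (PySem.Chars.splitOn cs sep) = cs := by
  rw [PySem.Chars.splitOn]
  simpa using pvGo_join sep hsep (cs.length + 1) cs [] (by omega)

theorem pvCountOcc_aux (pname : String) (l : List (String × List String)) (a : Int × List String) :
    (l.foldl (fun (acc : Int × List String) p =>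
        if PySem.List.pyGetD p.2 1 "" == pname then (acc.1 + 1, acc.2 ++ [p.1]) else acc) a).2
      = a.2 ++ (l.filter (fun p => PySem.List.pyGetD p.2 1 "" == pname)).map (·.1) := by
  induction l generalizing a with
  | nil => simp
  | cons p l ih =>
    simp only [List.foldl_cons, List.filter_cons]
    by_cases h : (PySem.List.pyGetD p.2 1 "" == pname) = true
    · rw [if_pos h, if_pos h, ih]
      simp
    · rw [if_neg h, if_neg h, ih]

theorem pvCountOcc_snd (apps : PySem.Dict String (List String)) (pname : String) :
    (pvCountOccurrences apps pname).2
      = (apps.items.filter (fun p => PySem.List.pyGetD p.2 1 "" == pname)).map (·.1) := by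
  rw [pvCountOccurrences, pvCountOcc_aux]
  simp

theorem pvIndex_getD (l : List (String × List String)) (pname : String) :
    ((l.foldl (fun (ix : PySem.Dict String (List String)) p =>
        ix.modify (PySem.List.pyGetD p.2 1 "") [] (· ++ [p.1])) PySem.Dict.empty).getD pname [])
      = (l.filter (fun p => PySem.List.pyGetD p.2 1 "" == pname)).map (·.1) := by
  have hmap := List.foldl_map (f := fun (p : String × List String) => (PySem.List.pyGetD p.2 1 "", p.1))
    (g := fun (d : PySem.Dict String (List String)) (q : String × String) => d.modify q.1 [] (· ++ [q.2]))
    (l := l) (init := PySem.Dict.empty)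
  rw [← hmap, PySem.Dict.getD_foldl_modify_append, List.filter_map]
  simp [Function.comp_def]


theorem pvHeader (analysis : String) :
    PySem.Str.join "\n"
      ("Suspicious LOLBAS detections (T1059):" :: ((PySem.Str.split? analysis "\n").getD []))
    = "Suspicious LOLBAS detections (T1059):\n" ++ analysis := by
  apply String.toList_inj.mp
  have h1 : PySem.Chars.split? analysis.toList "\n".toList
      = some (PySem.Chars.splitOn analysis.toList "\n".toList) := by
    simp [PySem.Chars.split?]
  have h2 := PySem.Str.split?_map analysis "\n"
  rw [h1] at h2
  cases hs : PySem.Str.split? analysis "\n" with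
  | none => rw [hs] at h2; simp at h2
  | some ls =>
    rw [hs] at h2
    simp at h2
    rw [PySem.Str.toList_join, String.toList_append]
    simp only [List.map_cons, Option.getD_some]
    rw [h2, PySem.Chars.join, show ("\n".toList) = ['\n'] from rfl]
    have hne : PySem.Chars.splitOn analysis.toList ['\n'] ≠ [] := by
      rw [PySem.Chars.splitOn]; exact pvGo_ne_nil _ _ _ _ _
    rw [pvIntercalate_cons _ _ _ hne, pvJoin_splitOn _ _ (by decide)]
    rfl

-- ===== VERDICT (by name: the statement is the Claim_ definition above) =====

theorem DetectLOLBAS_spec : Claim_equal_DetectLOLBAS := by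
  intro apps _ _
  unfold Spec_DetectLOLBAS DetectLOLBAS DetectLOLBAS_alt
  have hfun :
      (fun (analysis process : String) =>
        ((((PySem.Dict.ofList apps).items.foldl
            (fun (ix : PySem.Dict String (List String)) p =>
              ix.modify (PySem.List.pyGetD p.2 1 "") [] (· ++ [p.1]))
            PySem.Dict.empty)).getD process []).foldl
          (fun analysis dis => analysis ++ pvBlock (PySem.Dict.ofList apps) process dis) analysis)
      = (fun (analysis process : String) =>
        (pvCountOccurrences (PySem.Dict.ofList apps) process).2.foldl
          (fun analysis dis => analysis ++ pvBlock (PySem.Dict.ofList apps) process dis) analysis) := by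
    funext analysis process
    rw [pvCountOcc_snd, pvIndex_getD]
  simp only [hfun]
  split
  · exact (pvHeader _).symm ▸ rfl
  · rfl
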